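-- pv_equiv track=rewrite | github.com/tangziyi1226-lab/digital-dairy | tools/platforms.py | detect_ai_chat_source
-- ===== SOURCE A (Python) =====
-- AI_CHAT_HOSTS = {
--     "chatgpt.com": "chatgpt",
--     "chat.openai.com": "chatgpt",
--     "doubao.com": "doubao",
--     "www.doubao.com": "doubao",
--     "deepseek.com": "deepseek",
--     "chat.deepseek.com": "deepseek",
-- }
--
-- def detect_ai_chat_source(host: str | None) -> str | None:
--     if not host:
--         return None
--     normalized = host.lower()
--     for domain, source in AI_CHAT_HOSTS.items():
--         if normalized == domain or normalized.endswith("." + domain):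
--             return source
--     return None
-- ===== SOURCE B (Python) =====
-- AI_CHAT_HOSTS = {
--     "chatgpt.com": "chatgpt",
--     "chat.openai.com": "chatgpt",
--     "doubao.com": "doubao",
--     "www.doubao.com": "doubao",
--     "deepseek.com": "deepseek",
--     "chat.deepseek.com": "deepseek",
-- }
--
-- def detect_ai_chat_source(host):
--     if not host:
--         return None
--     normalized = host.lower()
--     # candidate suffixes at label boundaries, most specific first
--     candidates = [normalized]
--     for i, ch in enumerate(normalized):
--         if ch == '.':
--             candidates.append(normalized[i + 1:])
--     for cand in candidates:
--         source = AI_CHAT_HOSTS.get(cand)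
--         if source is not None:
--             return source
--     return None
-- ===== Notes on version B (the rewrite author's own statement) =====
-- stated objective: idiomatic
-- what changed: Instead of scanning every dict entry with an endswith test, B collects the host's dot-boundary suffixes in one character pass and probes the dict by hash lookup, most specific suffix first.
import Mathlib
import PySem

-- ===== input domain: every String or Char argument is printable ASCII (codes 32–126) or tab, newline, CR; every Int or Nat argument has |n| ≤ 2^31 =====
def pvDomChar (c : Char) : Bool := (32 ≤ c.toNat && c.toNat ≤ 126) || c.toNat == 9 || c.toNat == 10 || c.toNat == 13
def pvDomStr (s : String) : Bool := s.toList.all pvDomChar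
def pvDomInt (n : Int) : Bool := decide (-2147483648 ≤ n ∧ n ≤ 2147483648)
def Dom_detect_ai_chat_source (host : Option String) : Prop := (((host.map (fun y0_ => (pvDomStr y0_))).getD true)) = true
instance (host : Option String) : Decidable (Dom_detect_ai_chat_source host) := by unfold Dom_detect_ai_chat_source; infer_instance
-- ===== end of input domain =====

-- B replaces A's scan of every dict entry with an endswith test by one character pass that
-- collects the host's dot-boundary suffixes and probes the dict by lookup (idiomatic alternative; same result).

-- ===== PORT A =====
def AI_CHAT_HOSTS : PySem.Dict String String :=
  PySem.Dict.ofList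
    [("chatgpt.com", "chatgpt"),
     ("chat.openai.com", "chatgpt"),
     ("doubao.com", "doubao"),
     ("www.doubao.com", "doubao"),
     ("deepseek.com", "deepseek"),
     ("chat.deepseek.com", "deepseek")]

-- 'for domain, source in AI_CHAT_HOSTS.items(): if normalized == domain or normalized.endswith("." + domain): return source'
def detectLoopA (normalized : String) : List (String × String) → Option String
  | [] => none
  | (domain, source) :: rest =>
      if normalized == domain || PySem.Str.endswith normalized ("." ++ domain) then some source
      else detectLoopA normalized rest

def detect_ai_chat_source (host : Option String) : Option String :=
  match host with
  | none => none
  | some h =>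
      if h == "" then none
      else detectLoopA (PySem.Str.lower h) AI_CHAT_HOSTS.items

-- ===== PORT B =====
-- 'candidates = [normalized]; for i, ch in enumerate(normalized): if ch == '.': candidates.append(normalized[i+1:])'
def candidatesB (normalized : String) : List String :=
  (PySem.List.enumerate normalized.toList 0).foldl
    (fun acc p =>
      if p.2 == '.' then acc ++ [PySem.Str.slice normalized (some (p.1 + 1)) none] else acc)
    [normalized]

-- 'for cand in candidates: source = AI_CHAT_HOSTS.get(cand); if source is not None: return source'
def pickB : List String → Option String
  | [] => none
  | cand :: rest =>
      match PySem.Dict.get? AI_CHAT_HOSTS cand with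
      | some source => some source
      | none => pickB rest

def detect_ai_chat_source_alt (host : Option String) : Option String :=
  match host with
  | none => none
  | some h =>
      if h == "" then none
      else pickB (candidatesB (PySem.Str.lower h))

-- ===== PRECONDITION & SPEC =====
def Spec_detect_ai_chat_source (host : Option String) (out : Option String) : Prop := out = detect_ai_chat_source_alt host
instance (host : Option String) (out : Option String) : Decidable (Spec_detect_ai_chat_source host out) := by unfold Spec_detect_ai_chat_source; infer_instance

-- ===== CLAIM (what is proved, stated in full; the proofs are below) =====
def Claim_equal_detect_ai_chat_source : Prop := ∀ (host : Option String), Dom_detect_ai_chat_source host → Spec_detect_ai_chat_source host (detect_ai_chat_source host)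

-- ===== LEMMAS AND PROOFS =====

def Dotted (k l : List Char) : Prop := l = k ∨ ('.' :: k) <:+ l

theorem hosts_nodup : AI_CHAT_HOSTS.keys.Nodup := by decide

theorem pairCompat : ∀ p1 ∈ AI_CHAT_HOSTS.items, ∀ p2 ∈ AI_CHAT_HOSTS.items,
    (p1.1 = p2.1 ∨ ('.' :: p2.1.toList) <:+ p1.1.toList) → p1.2 = p2.2 := by decide

-- any two dict entries matching the same host carry the same source label
theorem dotted_compat {l : List Char} :
    ∀ p1 ∈ AI_CHAT_HOSTS.items, ∀ p2 ∈ AI_CHAT_HOSTS.items,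
      Dotted p1.1.toList l → Dotted p2.1.toList l → p1.2 = p2.2 := by
  intro p1 h1 p2 h2 hd1 hd2
  rcases hd1 with e1 | s1 <;> rcases hd2 with e2 | s2
  · exact pairCompat p1 h1 p2 h2 (Or.inl (String.toList_inj.mp (e1.symm.trans e2)))
  · exact pairCompat p1 h1 p2 h2 (Or.inr (by rw [← e1]; exact s2))
  · exact (pairCompat p2 h2 p1 h1 (Or.inr (by rw [← e2]; exact s1))).symm
  · rcases List.suffix_or_suffix_of_suffix s1 s2 with h | h
    · rcases List.suffix_cons_iff.mp h with h' | h'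
      · exact pairCompat p1 h1 p2 h2 (Or.inl (String.toList_inj.mp (List.cons_injective h')))
      · exact (pairCompat p2 h2 p1 h1 (Or.inr h')).symm
    · rcases List.suffix_cons_iff.mp h with h' | h'
      · exact pairCompat p1 h1 p2 h2 (Or.inl (String.toList_inj.mp (List.cons_injective h').symm))
      · exact pairCompat p1 h1 p2 h2 (Or.inr h')

theorem matchA_iff (n d : String) :
    (n == d || PySem.Str.endswith n ("." ++ d)) = true ↔ Dotted d.toList n.toList := by
  simp [Dotted, PySem.Str.endswith_eq, PySem.Chars.endswith_iff, String.toList_append]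
  constructor
  · rintro (h | h)
    · exact Or.inl (by rw [h])
    · exact Or.inr (by simpa using h)
  · rintro (h | h)
    · exact Or.inl (String.toList_inj.mp h)
    · exact Or.inr (by simpa using h)

theorem loopA_eq_none_iff (n : String) (es : List (String × String)) :
    detectLoopA n es = none ↔ ∀ p ∈ es, ¬ Dotted p.1.toList n.toList := by
  induction es with
  | nil => simp [detectLoopA]
  | cons p rest ih =>
    obtain ⟨d, s⟩ := p
    by_cases hm : (n == d || PySem.Str.endswith n ("." ++ d)) = true
    · have hd := (matchA_iff n d).mp hm
      simp only [detectLoopA, hm, if_true]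
      constructor
      · intro h; cases h
      · intro h; exact absurd hd (h (d, s) List.mem_cons_self)
    · have hd := (matchA_iff n d).not.mp hm
      simp only [detectLoopA, hm, Bool.false_eq_true, if_false]
      rw [ih]
      constructor
      · intro h p hp
        rcases List.mem_cons.mp hp with rfl | hp'
        · exact hd
        · exact h p hp'
      · intro h p hp
        exact h p (List.mem_cons_of_mem _ hp)

theorem loopA_eq_some (n : String) (es : List (String × String)) (v : String)
    (h : detectLoopA n es = some v) :
    ∃ p ∈ es, Dotted p.1.toList n.toList ∧ p.2 = v := by
  induction es with
  | nil => simp [detectLoopA] at h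
  | cons p rest ih =>
    obtain ⟨d, s⟩ := p
    by_cases hm : (n == d || PySem.Str.endswith n ("." ++ d)) = true
    · simp only [detectLoopA, hm, if_true, Option.some_inj] at h
      exact ⟨(d, s), List.mem_cons_self, (matchA_iff n d).mp hm, h⟩
    · simp only [detectLoopA, hm, if_false, Bool.false_eq_true] at h
      obtain ⟨p, hp, hd, hv⟩ := ih h
      exact ⟨p, List.mem_cons_of_mem _ hp, hd, hv⟩

theorem candidatesB_eq (n : String) :
    candidatesB n = [n] ++ ((PySem.List.enumerate n.toList 0).filter (fun p => p.2 == '.')).map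
      (fun p => PySem.Str.slice n (some (p.1 + 1)) none) := by
  unfold candidatesB
  exact PySem.List.foldl_append_if _ _ _ _

theorem mem_candidatesB_dotted (n : String) (c : String) (hc : c ∈ candidatesB n) :
    Dotted c.toList n.toList := by
  rw [candidatesB_eq] at hc
  rcases List.mem_append.mp hc with h | h
  · left
    simp at h
    rw [h]
  · obtain ⟨p, hp, hcp⟩ := List.mem_map.mp h
    obtain ⟨hpe, hdot⟩ := List.mem_filter.mp hp
    obtain ⟨k, hk, hpk⟩ := (PySem.List.mem_enumerate_iff _ _ _).mp hpe
    subst hpk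
    simp only [beq_iff_eq] at hdot
    right
    have hslice : c.toList = n.toList.drop (k + 1) := by
      rw [← hcp, PySem.Str.toList_slice, PySem.Chars.slice_eq_listSlice]
      have : (0 + (k : Int) + 1) = ((k + 1 : Nat) : Int) := by push_cast; ring
      rw [this, PySem.List.slice_from_natCast]
    rw [hslice]
    have hc : ('.' : Char) :: n.toList.drop (k + 1) = n.toList.drop k := by
      rw [← hdot]
      exact List.getElem_cons_drop hk
    rw [hc]
    exact List.drop_suffix k n.toList

theorem dotted_mem_candidatesB (n : String) (k : List Char) (hd : Dotted k n.toList) :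
    ∃ c ∈ candidatesB n, c.toList = k := by
  rcases hd with e | s
  · exact ⟨n, by rw [candidatesB_eq]; exact List.mem_append_left _ (List.mem_singleton.mpr rfl), e⟩
  · obtain ⟨t, ht⟩ := s
    have hdrop : n.toList.drop t.length = '.' :: k := by rw [← ht, List.drop_left]
    have hlen : t.length < n.toList.length := by
      rw [← ht]; simp
    have hcons : n.toList[t.length]'hlen :: n.toList.drop (t.length + 1) = '.' :: k := by
      rw [List.getElem_cons_drop hlen]
      exact hdrop
    obtain ⟨hget, hdrop1⟩ := List.cons_eq_cons.mp hcons
    refine ⟨PySem.Str.slice n (some ((0 : Int) + t.length + 1)) none, ?_, ?_⟩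
    · rw [candidatesB_eq]
      refine List.mem_append_right _ (List.mem_map.mpr ⟨((0 : Int) + t.length, n.toList[t.length]'hlen), ?_, rfl⟩)
      refine List.mem_filter.mpr ⟨(PySem.List.mem_enumerate_iff _ _ _).mpr ⟨t.length, hlen, rfl⟩, ?_⟩
      simp [hget]
    · rw [PySem.Str.toList_slice, PySem.Chars.slice_eq_listSlice]
      have : ((0 : Int) + t.length + 1) = ((t.length + 1 : Nat) : Int) := by push_cast; ring
      rw [this, PySem.List.slice_from_natCast, hdrop1]

theorem pickB_eq_none_iff (cs : List String) :
    pickB cs = none ↔ ∀ c ∈ cs, PySem.Dict.get? AI_CHAT_HOSTS c = none := by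
  induction cs with
  | nil => simp [pickB]
  | cons c rest ih =>
    cases hg : PySem.Dict.get? AI_CHAT_HOSTS c with
    | none => simp [pickB, hg, ih]
    | some v => simp [pickB, hg]

theorem pickB_eq_some (cs : List String) (v : String) (h : pickB cs = some v) :
    ∃ c ∈ cs, PySem.Dict.get? AI_CHAT_HOSTS c = some v := by
  induction cs with
  | nil => simp [pickB] at h
  | cons c rest ih =>
    cases hg : PySem.Dict.get? AI_CHAT_HOSTS c with
    | none =>
      rw [pickB, hg] at h
      obtain ⟨c', hc', hg'⟩ := ih h
      exact ⟨c', List.mem_cons_of_mem _ hc', hg'⟩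
    | some w =>
      rw [pickB, hg] at h
      exact ⟨c, List.mem_cons_self, by rw [hg, ← h]⟩

theorem main_eq (n : String) :
    detectLoopA n AI_CHAT_HOSTS.items = pickB (candidatesB n) := by
  cases hA : detectLoopA n AI_CHAT_HOSTS.items with
  | none =>
    rw [loopA_eq_none_iff] at hA
    symm
    rw [pickB_eq_none_iff]
    intro c hc
    cases hg : PySem.Dict.get? AI_CHAT_HOSTS c with
    | none => rfl
    | some v =>
      have hm : (c, v) ∈ AI_CHAT_HOSTS.items :=
        (PySem.Dict.get?_eq_some_iff_mem_items _ _ _ hosts_nodup).mp hg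
      exact absurd (mem_candidatesB_dotted n c hc) (hA (c, v) hm)
  | some v =>
    obtain ⟨p, hp, hd, hv⟩ := loopA_eq_some n _ v hA
    obtain ⟨c, hc, hck⟩ := dotted_mem_candidatesB n p.1.toList hd
    have hcp : c = p.1 := String.toList_inj.mp hck
    have hgc : PySem.Dict.get? AI_CHAT_HOSTS c = some p.2 := by
      rw [hcp]
      exact (PySem.Dict.get?_eq_some_iff_mem_items _ _ _ hosts_nodup).mpr (by simpa using hp)
    cases hB : pickB (candidatesB n) with
    | none =>
      rw [pickB_eq_none_iff] at hB
      exact absurd (hB c hc) (by simp [hgc])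
    | some w =>
      obtain ⟨c', hc', hg'⟩ := pickB_eq_some _ _ hB
      have hm' : (c', w) ∈ AI_CHAT_HOSTS.items :=
        (PySem.Dict.get?_eq_some_iff_mem_items _ _ _ hosts_nodup).mp hg'
      have := dotted_compat (c', w) hm' p hp (mem_candidatesB_dotted n c' hc') hd
      rw [hv] at this
      exact congrArg some this.symm

theorem detect_eq_alt : ∀ (host : Option String),
    detect_ai_chat_source host = detect_ai_chat_source_alt host := by
  intro host
  cases host with
  | none => rfl
  | some h =>
    simp only [detect_ai_chat_source, detect_ai_chat_source_alt]
    by_cases he : (h == "") = true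
    · simp [he]
    · simp [he, main_eq]

-- ===== VERDICT (by name: the statement is the Claim_ definition above) =====
set_option maxHeartbeats 1000000 in
theorem detect_ai_chat_source_spec : Claim_equal_detect_ai_chat_source := by
  intro host _
  show detect_ai_chat_source host = detect_ai_chat_source_alt host
  exact detect_eq_alt host
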